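-- pv_equiv track=rewrite | github.com/bigmike9000/hyperuniformity | compute_all_nonunimodular.py | generate_chain_2x2
-- ===== SOURCE A (Python) =====
-- def generate_chain_2x2(M, target_n):
--     """Generate substitution chain from 2x2 matrix.
--
--     M = [[a,b],[c,d]] means:
--       tile 'a' -> 'a'^a 'b'^b  (a copies of tile a, then b copies of tile b)
--       tile 'b' -> 'a'^c 'b'^d
--     """
--     a_row = M[0]  # [num_a, num_b] produced by tile 'a'
--     b_row = M[1]  # [num_a, num_b] produced by tile 'b'
--
--     rule_a = 'a' * a_row[0] + 'b' * a_row[1]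
--     rule_b = 'a' * b_row[0] + 'b' * b_row[1]
--     rules = {'a': rule_a, 'b': rule_b}
--
--     seq = 'a'
--     for _ in range(200):
--         if len(seq) >= target_n:
--             break
--         seq = ''.join(rules[ch] for ch in seq)
--
--     return seq
-- ===== SOURCE B (Python) =====
-- def generate_chain_2x2(M, target_n):
--     """Generate substitution chain from 2x2 matrix.
--
--     Two phases: first find the expansion depth by iterating the tile counts
--     (na, nb) with the count matrix obtained by counting letters in the rule
--     strings; then build the string by recursive per-tile expansion of that
--     depth starting from 'a'.
--     """
--     rule_a = 'a' * M[0][0] + 'b' * M[0][1]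
--     rule_b = 'a' * M[1][0] + 'b' * M[1][1]
--     rules = {'a': rule_a, 'b': rule_b}
--     ca = (rule_a.count('a'), rule_a.count('b'))
--     cb = (rule_b.count('a'), rule_b.count('b'))
--
--     na, nb, depth = 1, 0, 0
--     for _ in range(200):
--         if na + nb >= target_n:
--             break
--         na, nb = na * ca[0] + nb * cb[0], na * ca[1] + nb * cb[1]
--         depth += 1
--
--     def expand(ch, d):
--         if d == 0:
--             return ch
--         return ''.join(expand(c, d - 1) for c in rules[ch])
--
--     return expand('a', depth)
-- ===== Notes on version B (the rewrite author's own statement) =====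
-- stated objective: alternative
-- what changed: B replaces A's whole-string BFS rewriting loop by two phases: a numeric loop on tile counts (na,nb), using the count matrix obtained by counting letters in the rule strings, to find the expansion depth, then a recursive per-tile expansion of 'a' to that depth; Pre_ excludes only inputs where A raises IndexError (M lacking two rows of two entries).
import Mathlib
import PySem

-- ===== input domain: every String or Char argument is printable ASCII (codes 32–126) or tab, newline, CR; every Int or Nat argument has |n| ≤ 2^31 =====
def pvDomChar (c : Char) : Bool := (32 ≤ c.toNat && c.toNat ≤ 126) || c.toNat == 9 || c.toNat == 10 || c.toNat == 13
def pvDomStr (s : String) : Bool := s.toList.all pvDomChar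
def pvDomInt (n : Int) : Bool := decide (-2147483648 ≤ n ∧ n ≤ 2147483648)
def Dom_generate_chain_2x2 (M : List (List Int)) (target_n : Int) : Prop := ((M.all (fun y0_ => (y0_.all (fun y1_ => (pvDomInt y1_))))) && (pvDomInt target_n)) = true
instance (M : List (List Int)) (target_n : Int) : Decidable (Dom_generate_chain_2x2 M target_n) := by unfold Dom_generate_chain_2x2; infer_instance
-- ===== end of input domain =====

-- B replaces A's whole-string rewrite loop by a numeric count-matrix loop (counts read off the
-- rule strings) that finds the expansion depth, followed by a recursive per-tile expansion;
-- alternative decomposition, not faster.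

-- ===== PORT A =====
-- dict {'a': rule_a, 'b': rule_b} lookup; every character of seq is 'a' or 'b', so the
-- KeyError branch of rules[ch] is unreachable (the [] arm is never taken on reachable chars).
def pvRule (ra rb : List Char) (ch : Char) : List Char :=
  if ch = 'a' then ra else if ch = 'b' then rb else []

-- the 'for _ in range(200)' loop with its check-before-expand break
def pvLoopA (ra rb : List Char) (target : Int) : Nat → List Char → List Char
  | 0, s => s
  | f + 1, s =>
      if target ≤ (s.length : Int) then s
      else pvLoopA ra rb target f (s.flatMap (pvRule ra rb))

def generate_chain_2x2 (M : List (List Int)) (target_n : Int) : String :=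
  match PySem.List.pyGet? M 0, PySem.List.pyGet? M 1 with
  | some a_row, some b_row =>
    match PySem.List.pyGet? a_row 0, PySem.List.pyGet? a_row 1,
          PySem.List.pyGet? b_row 0, PySem.List.pyGet? b_row 1 with
    | some a0, some a1, some b0, some b1 =>
        -- 'a' * n with possibly negative n: empty for n ≤ 0, hence .toNat
        String.ofList (pvLoopA (List.replicate a0.toNat 'a' ++ List.replicate a1.toNat 'b')
                           (List.replicate b0.toNat 'a' ++ List.replicate b1.toNat 'b')
                           target_n 200 ['a'])
    | _, _, _, _ => ""  -- IndexError: outside Pre_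
  | _, _ => ""          -- IndexError: outside Pre_

-- ===== PORT B =====
-- the count loop of B: na, nb evolve by the count matrix read off the rule strings
def pvCountLoop (cAa cAb cBa cBb : Nat) (target : Int) : Nat → Int → Int → Nat → Nat
  | 0, _, _, d => d
  | f + 1, na, nb, d =>
      if target ≤ na + nb then d
      else pvCountLoop cAa cAb cBa cBb target f
            (na * cAa + nb * cBa) (na * cAb + nb * cBb) (d + 1)

-- B's rules dict lookup (same dict as in Source B; the KeyError branch is unreachable)
def pvRuleB (ra rb : List Char) (ch : Char) : List Char :=
  if ch = 'a' then ra else if ch = 'b' then rb else []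

-- B's recursive expand(ch, d)
def pvExpand (ra rb : List Char) : Char → Nat → List Char
  | ch, 0 => [ch]
  | ch, d + 1 => (pvRuleB ra rb ch).flatMap (fun c => pvExpand ra rb c d)

def generate_chain_2x2_alt (M : List (List Int)) (target_n : Int) : String :=
  match (PySem.List.pyGet? M 0).bind (fun a_row =>
        (PySem.List.pyGet? M 1).bind (fun b_row =>
        (PySem.List.pyGet? a_row 0).bind (fun a0 =>
        (PySem.List.pyGet? a_row 1).bind (fun a1 =>
        (PySem.List.pyGet? b_row 0).bind (fun b0 =>
        (PySem.List.pyGet? b_row 1).map (fun b1 => (a0, a1, b0, b1))))))) with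
  | none => ""  -- IndexError: outside Pre_
  | some (a0, a1, b0, b1) =>
      let ra := List.replicate a0.toNat 'a' ++ List.replicate a1.toNat 'b'
      let rb := List.replicate b0.toNat 'a' ++ List.replicate b1.toNat 'b'
      String.ofList (pvExpand ra rb 'a'
        (pvCountLoop (ra.count 'a') (ra.count 'b') (rb.count 'a') (rb.count 'b')
          target_n 200 1 0 0))

-- ===== PRECONDITION & SPEC =====
-- Pre_ excludes exactly the IndexError inputs: A reads M[0], M[1] and two entries of each.
def Pre_generate_chain_2x2 (M : List (List Int)) (target_n : Int) : Prop :=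
  2 ≤ M.length ∧ 2 ≤ (M.getD 0 []).length ∧ 2 ≤ (M.getD 1 []).length
instance (M : List (List Int)) (target_n : Int) : Decidable (Pre_generate_chain_2x2 M target_n) := by
  unfold Pre_generate_chain_2x2; infer_instance
def pvWitness_generate_chain_2x2 : List (List Int) × Int := ([[1, 1], [1, 0]], 5)

def Spec_generate_chain_2x2 (M : List (List Int)) (target_n : Int) (out : String) : Prop := out = generate_chain_2x2_alt M target_n
instance (M : List (List Int)) (target_n : Int) (out : String) : Decidable (Spec_generate_chain_2x2 M target_n out) := by unfold Spec_generate_chain_2x2; infer_instance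

-- ===== CLAIM (what is proved, stated in full; the proofs are below) =====
def Claim_equal_generate_chain_2x2 : Prop := ∀ (M : List (List Int)) (target_n : Int), Dom_generate_chain_2x2 M target_n → Pre_generate_chain_2x2 M target_n → Spec_generate_chain_2x2 M target_n (generate_chain_2x2 M target_n)

-- ===== LEMMAS AND PROOFS =====

lemma pvRuleB_eq_pvRule (ra rb : List Char) (ch : Char) : pvRuleB ra rb ch = pvRule ra rb ch := rfl

-- one rewrite step of A's loop
def pvStep (ra rb : List Char) (s : List Char) : List Char := s.flatMap (pvRule ra rb)

def pvOnlyAB (s : List Char) : Prop := ∀ c ∈ s, c = 'a' ∨ c = 'b'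

lemma pvStep_singleton (ra rb : List Char) (c : Char) :
    pvStep ra rb [c] = pvRule ra rb c := by
  simp [pvStep]

lemma pvIter_flatMap (ra rb : List Char) :
    ∀ (d : Nat) (s : List Char),
      (pvStep ra rb)^[d] s = s.flatMap (fun c => (pvStep ra rb)^[d] [c]) := by
  intro d
  induction d with
  | zero => intro s; simp
  | succ d ih =>
      intro s
      rw [Function.iterate_succ_apply]
      rw [ih (pvStep ra rb s)]
      show (s.flatMap (pvRule ra rb)).flatMap _ = _
      rw [List.flatMap_assoc]
      refine List.flatMap_congr (fun c _ => ?_)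
      rw [Function.iterate_succ_apply, pvStep_singleton, ih (pvRule ra rb c)]

lemma pvExpand_eq_iter (ra rb : List Char) :
    ∀ (d : Nat) (ch : Char), pvExpand ra rb ch d = (pvStep ra rb)^[d] [ch] := by
  intro d
  induction d with
  | zero => intro ch; simp [pvExpand]
  | succ d ih =>
      intro ch
      rw [Function.iterate_succ_apply, pvStep_singleton]
      rw [pvIter_flatMap ra rb d (pvRule ra rb ch)]
      simp only [pvExpand, pvRuleB_eq_pvRule]
      exact List.flatMap_congr (fun c _ => ih c)

lemma pvLength_onlyAB (s : List Char) (h : pvOnlyAB s) :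
    s.length = s.count 'a' + s.count 'b' := by
  induction s with
  | nil => simp
  | cons c s ih =>
      have hc := h c (by simp)
      have hs : pvOnlyAB s := fun x hx => h x (by simp [hx])
      rcases hc with hc | hc <;> subst hc <;>
        simp [List.count_cons, ih hs] <;> omega

lemma pvOnlyAB_step (ra rb s : List Char) (hra : pvOnlyAB ra) (hrb : pvOnlyAB rb) :
    pvOnlyAB (pvStep ra rb s) := by
  intro c hc
  simp only [pvStep, List.mem_flatMap] at hc
  obtain ⟨x, _, hx⟩ := hc
  unfold pvRule at hx
  split_ifs at hx with h1 h2
  · exact hra c hx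
  · exact hrb c hx
  · simp at hx

lemma pvCount_step (ra rb s : List Char) (h : pvOnlyAB s) (x : Char) :
    (pvStep ra rb s).count x = s.count 'a' * ra.count x + s.count 'b' * rb.count x := by
  induction s with
  | nil => simp [pvStep]
  | cons c s ih =>
      have hc := h c (by simp)
      have hs : pvOnlyAB s := fun y hy => h y (by simp [hy])
      have hstep : pvStep ra rb (c :: s) = pvRule ra rb c ++ pvStep ra rb s := by
        simp [pvStep]
      rw [hstep, List.count_append, ih hs]
      rcases hc with hc | hc <;> subst hc <;>
        simp [pvRule, List.count_cons] <;> ring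

-- the main simulation: A's string loop equals B's count loop composed with iteration depth
lemma pvMain (ra rb : List Char) (hra : pvOnlyAB ra) (hrb : pvOnlyAB rb) (t : Int) :
    ∀ (fuel : Nat) (s : List Char) (d0 : Nat), pvOnlyAB s →
      s = (pvStep ra rb)^[d0] ['a'] →
      pvLoopA ra rb t fuel s =
        (pvStep ra rb)^[pvCountLoop (ra.count 'a') (ra.count 'b') (rb.count 'a') (rb.count 'b')
          t fuel (s.count 'a') (s.count 'b') d0] ['a'] := by
  intro fuel
  induction fuel with
  | zero => intro s d0 _ hs; simpa [pvLoopA, pvCountLoop] using hs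
  | succ f ih =>
      intro s d0 honly hs
      have hlen : (s.length : Int) = (s.count 'a' : Int) + (s.count 'b' : Int) := by
        rw [pvLength_onlyAB s honly]; push_cast; ring
      by_cases hcond : t ≤ (s.length : Int)
      · have hcond' : t ≤ (s.count 'a' : Int) + (s.count 'b' : Int) := hlen ▸ hcond
        rw [pvLoopA, pvCountLoop, if_pos hcond, if_pos hcond']
        exact hs
      · have hcond' : ¬ t ≤ (s.count 'a' : Int) + (s.count 'b' : Int) := hlen ▸ hcond
        rw [pvLoopA, pvCountLoop, if_neg hcond, if_neg hcond']
        have hstep : pvOnlyAB (pvStep ra rb s) := pvOnlyAB_step ra rb s hra hrb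
        have hiter : pvStep ra rb s = (pvStep ra rb)^[d0 + 1] ['a'] := by
          rw [Function.iterate_succ_apply', ← hs]
        have := ih (pvStep ra rb s) (d0 + 1) hstep hiter
        have hca : ((pvStep ra rb s).count 'a' : Int) =
            (s.count 'a' : Int) * (ra.count 'a' : Int) + (s.count 'b' : Int) * (rb.count 'a' : Int) := by
          rw [pvCount_step ra rb s honly 'a']; push_cast; ring
        have hcb : ((pvStep ra rb s).count 'b' : Int) =
            (s.count 'a' : Int) * (ra.count 'b' : Int) + (s.count 'b' : Int) * (rb.count 'b' : Int) := by
          rw [pvCount_step ra rb s honly 'b']; push_cast; ring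
        rw [← hca, ← hcb]
        exact this

lemma pvOnlyAB_rule (n m : Nat) : pvOnlyAB (List.replicate n 'a' ++ List.replicate m 'b') := by
  intro c hc
  rcases List.mem_append.1 hc with h | h <;>
    simp [List.eq_of_mem_replicate h]

-- ===== VERDICT (by name: the statement is the Claim_ definition above) =====
theorem generate_chain_2x2_spec : Claim_equal_generate_chain_2x2 := by
  intro M target_n _ hpre
  obtain ⟨hM, h0, h1⟩ := hpre
  match M, hM with
  | r0 :: r1 :: rest, _ =>
    simp only [List.getD, List.getElem?_cons_zero, List.getElem?_cons_succ, Option.getD_some] at h0 h1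
    match r0, h0 with
    | x0 :: x1 :: r0t, _ =>
      match r1, h1 with
      | y0 :: y1 :: r1t, _ =>
        show _ = generate_chain_2x2_alt _ _
        have g0 : PySem.List.pyGet? ((x0 :: x1 :: r0t) :: (y0 :: y1 :: r1t) :: rest) 0
            = some (x0 :: x1 :: r0t) := by
          simp [PySem.List.pyGet?, PySem.List.pyIdx?]; all_goals (rw [if_pos (by positivity)]; simp)
        have g1 : PySem.List.pyGet? ((x0 :: x1 :: r0t) :: (y0 :: y1 :: r1t) :: rest) 1
            = some (y0 :: y1 :: r1t) := by
          simp [PySem.List.pyGet?, PySem.List.pyIdx?]; all_goals (rw [if_pos (by positivity)]; simp)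
        have ga0 : PySem.List.pyGet? (x0 :: x1 :: r0t) 0 = some x0 := by
          simp [PySem.List.pyGet?, PySem.List.pyIdx?]; all_goals (rw [if_pos (by positivity)]; simp)
        have ga1 : PySem.List.pyGet? (x0 :: x1 :: r0t) 1 = some x1 := by
          simp [PySem.List.pyGet?, PySem.List.pyIdx?]; all_goals (rw [if_pos (by positivity)]; simp)
        have gb0 : PySem.List.pyGet? (y0 :: y1 :: r1t) 0 = some y0 := by
          simp [PySem.List.pyGet?, PySem.List.pyIdx?]; all_goals (rw [if_pos (by positivity)]; simp)
        have gb1 : PySem.List.pyGet? (y0 :: y1 :: r1t) 1 = some y1 := by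
          simp [PySem.List.pyGet?, PySem.List.pyIdx?]; all_goals (rw [if_pos (by positivity)]; simp)
        rw [generate_chain_2x2, generate_chain_2x2_alt]
        simp only [g0, g1, ga0, ga1, gb0, gb1, Option.bind_some, Option.map_some]
        congr 1
        rw [pvExpand_eq_iter]
        have := pvMain (List.replicate x0.toNat 'a' ++ List.replicate x1.toNat 'b')
          (List.replicate y0.toNat 'a' ++ List.replicate y1.toNat 'b')
          (pvOnlyAB_rule _ _) (pvOnlyAB_rule _ _) target_n
          200 ['a'] 0 (by intro c hc; simp at hc; simp [hc]) (by simp)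
        simpa using this
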